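-- pv_equiv track=rewrite | github.com/YoussefTrabelsi1/Leetcode_solutions | Python/Count the Number of Computer Unlocking Permutations/brute_force_unlock_permutations.py | is_valid_permutation
-- ===== SOURCE A (Python) =====
-- def is_valid_permutation(perm, complexity):
--     """
--     Check if a permutation perm of [0..n-1] is a valid unlock order.
--     We enforce perm[0] == 0 (root unlocked first).
--     """
--     n = len(complexity)
--     if perm[0] != 0:
--         return False
--
--     unlocked = {0}  # computer 0 is unlocked first
--
--     for pos in range(1, n):
--         i = perm[pos]
--         ci = complexity[i]
--
--         ok = False
--         # Need some unlocked j < i with complexity[j] < complexity[i]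
--         for j in unlocked:
--             if j < i and complexity[j] < ci:
--                 ok = True
--                 break
--
--         if not ok:
--             return False
--
--         unlocked.add(i)
--
--     return True
-- ===== SOURCE B (Python) =====
-- def is_valid_permutation(perm, complexity):
--     """
--     Check if a permutation perm of [0..n-1] is a valid unlock order
--     (perm[0] must be 0), using a maintained prefix-minimum table instead
--     of rescanning the unlocked set: pm[k] is the minimum complexity among
--     unlocked computers j < k (None if there is none), so each step is an
--     O(1) query plus one table refresh.
--     """
--     n = len(complexity)
--     if perm[0] != 0:
--         return False
--
--     # computer 0 is unlocked first: pm[0] = None, pm[k] = complexity[0] for k >= 1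
--     pm = [None] + complexity[:1] * n
--
--     for pos in range(1, n):
--         i = perm[pos]
--         ci = complexity[i]
--         m = pm[i]
--         if m is None or m >= ci:
--             return False
--         # unlock i: fold complexity[i] into every prefix minimum past i
--         pm = [v if k <= i else (ci if v is None or ci < v else v)
--               for k, v in enumerate(pm)]
--
--     return True
-- ===== Notes on version B (the rewrite author's own statement) =====
-- stated objective: alternative
-- what changed: B drops A's unlocked-set and its per-step membership scan and instead maintains a prefix-minimum table pm with pm[k] = min complexity among unlocked computers j < k, so each step is a single O(1) table query plus one table refresh.
-- outside the precondition, e.g. on is_valid_permutation([0, -1], [3, 4]): A returns False, B returns True; on is_valid_permutation([0, 3], [3, 4]): A raises IndexError, B raises IndexError; on is_valid_permutation([], []): A raises IndexError, B raises IndexError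
import Mathlib
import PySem

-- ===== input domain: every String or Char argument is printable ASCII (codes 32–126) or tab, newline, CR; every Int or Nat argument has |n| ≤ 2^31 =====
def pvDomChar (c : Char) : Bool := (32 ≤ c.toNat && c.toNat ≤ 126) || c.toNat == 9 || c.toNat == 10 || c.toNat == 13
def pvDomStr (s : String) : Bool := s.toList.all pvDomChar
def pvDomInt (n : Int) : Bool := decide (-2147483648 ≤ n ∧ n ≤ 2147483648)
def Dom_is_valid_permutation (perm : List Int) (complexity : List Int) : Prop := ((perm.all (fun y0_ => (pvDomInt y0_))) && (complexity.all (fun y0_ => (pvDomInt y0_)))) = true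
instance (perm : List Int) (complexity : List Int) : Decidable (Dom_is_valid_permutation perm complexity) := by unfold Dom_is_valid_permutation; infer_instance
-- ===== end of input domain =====

-- B replaces A's per-step scan of the unlocked set by a maintained prefix-minimum table
-- (pm[k] = min complexity among unlocked j < k), a different data structure of similar cost (objective: alternative).

-- ===== PORT A =====
-- 'for pos in range(1, n)' with early 'return False', carrying the unlocked set
def pvLoopA (perm : List Int) (complexity : List Int) : List Int → PySem.Set Int → Bool
  | [], _ => true
  | pos :: rest, unlocked =>
    match PySem.List.pyGet? perm pos with
    | none => false          -- IndexError (outside Pre_)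
    | some i =>
      match PySem.List.pyGet? complexity i with
      | none => false        -- IndexError (outside Pre_)
      | some ci =>
        -- 'for j in unlocked: if j < i and complexity[j] < ci: ok = True; break'
        -- an order-independent any over the set (a lookup failure cannot arise inside Pre_)
        if unlocked.any (fun j => decide (j < i) &&
            (match PySem.List.pyGet? complexity j with
             | none => false
             | some cj => decide (cj < ci)))
        then pvLoopA perm complexity rest (PySem.Set.add unlocked i)
        else false

def is_valid_permutation (perm : List Int) (complexity : List Int) : Bool :=
  let n : Int := (complexity.length : Int)
  match PySem.List.pyGet? perm 0 with
  | none => false            -- IndexError on perm[0] (outside Pre_)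
  | some p0 =>
    if p0 ≠ 0 then false
    else pvLoopA perm complexity (PySem.List.pyRange 1 n 1) (PySem.Set.ofList [0])

-- ===== PORT B =====
-- pm = [v if k <= i else (ci if v is None or ci < v else v) for k, v in enumerate(pm)]
def pvUpd (i : Int) (ci : Int) (pm : List (Option Int)) : List (Option Int) :=
  (PySem.List.enumerate pm 0).map (fun kv =>
    if kv.1 ≤ i then kv.2
    else match kv.2 with
         | none => some ci
         | some v => if ci < v then some ci else some v)

def pvLoopB (perm : List Int) (complexity : List Int) : List Int → List (Option Int) → Bool
  | [], _ => true
  | pos :: rest, pm =>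
    match PySem.List.pyGet? perm pos with
    | none => false          -- IndexError (outside Pre_)
    | some i =>
      match PySem.List.pyGet? complexity i with
      | none => false        -- IndexError (outside Pre_)
      | some ci =>
        match PySem.List.pyGet? pm i with
        | none => false      -- IndexError (outside Pre_)
        | some none => false            -- 'm is None'
        | some (some m) =>
          if m ≥ ci then false          -- 'm >= ci'
          else pvLoopB perm complexity rest (pvUpd i ci pm)

def is_valid_permutation_alt (perm : List Int) (complexity : List Int) : Bool :=
  let n : Int := (complexity.length : Int)
  match PySem.List.pyGet? perm 0 with
  | none => false            -- IndexError on perm[0] (outside Pre_)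
  | some p0 =>
    if p0 ≠ 0 then false
    else
      -- pm = [None] + complexity[:1] * n
      pvLoopB perm complexity (PySem.List.pyRange 1 n 1)
        ((none : Option Int) ::
          (PySem.List.pyRepeat (PySem.List.slice complexity none (some 1)) n).map some)

-- ===== PRECONDITION & SPEC =====
-- Pre_ excludes inputs where perm is empty, or where perm does start with 0 but is shorter
-- than complexity or has an entry outside [0, n) among its first n = len(complexity) entries:
-- there A raises IndexError, or returns False only through an early exit / Python's
-- negative-index wraparound on a non-permutation input — accidents of indexing rather than
-- specified behaviour.
def Pre_is_valid_permutation (perm : List Int) (complexity : List Int) : Prop :=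
  perm ≠ [] ∧
  (perm[0]! ≠ 0 ∨
    (complexity.length ≤ perm.length ∧
     ∀ pos : Nat, pos < complexity.length →
       0 ≤ perm[pos]! ∧ perm[pos]! < (complexity.length : Int)))
instance (perm : List Int) (complexity : List Int) : Decidable (Pre_is_valid_permutation perm complexity) := by unfold Pre_is_valid_permutation; infer_instance

def pvWitness_is_valid_permutation : List Int × List Int := ([0, 2, 1], [1, 3, 2])

def Spec_is_valid_permutation (perm : List Int) (complexity : List Int) (out : Bool) : Prop := out = is_valid_permutation_alt perm complexity
instance (perm : List Int) (complexity : List Int) (out : Bool) : Decidable (Spec_is_valid_permutation perm complexity out) := by unfold Spec_is_valid_permutation; infer_instance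

-- ===== CLAIM (what is proved, stated in full; the proofs are below) =====
def Claim_equal_is_valid_permutation : Prop := ∀ (perm : List Int) (complexity : List Int), Dom_is_valid_permutation perm complexity → Pre_is_valid_permutation perm complexity → Spec_is_valid_permutation perm complexity (is_valid_permutation perm complexity)

-- ===== LEMMAS AND PROOFS =====

-- value of c[j] for an in-range nonnegative index
def pvAt (c : List Int) (j : Int) : Int := c.getD j.toNat 0

-- the minimum complexity among members of S below k (none if there are none):
-- the semantic content of B's table entry pm[k]
def pvMinB (c : List Int) (S : List Int) (k : Int) : Option Int :=
  ((S.filter (fun j => decide (j < k))).map (fun j => pvAt c j)).min?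

lemma pvGet_eq {alpha : Type} (l : List alpha) (i : Int) (h0 : 0 ≤ i) (h : i.toNat < l.length) :
    PySem.List.pyGet? l i = some (l[i.toNat]'h) := by
  obtain ⟨m, rfl⟩ : ∃ m : Nat, i = (m : Int) := ⟨i.toNat, (Int.toNat_of_nonneg h0).symm⟩
  rw [PySem.List.pyGet?_natCast]
  exact List.getElem?_eq_getElem (by simpa using h)

lemma pvGet_of_bounds (c : List Int) (j : Int) (h0 : 0 ≤ j) (h1 : j < (c.length : Int)) :
    PySem.List.pyGet? c j = some (pvAt c j) := by
  have h : j.toNat < c.length := by omega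
  rw [pvGet_eq c j h0 h]
  simp [pvAt, List.getD_eq_getElem?_getD, List.getElem?_eq_getElem h]

lemma pv_min?_append_singleton (l : List Int) (a : Int) :
    (l ++ [a]).min? = some (match l.min? with | none => a | some v => if a < v then a else v) := by
  cases l with
  | nil => rfl
  | cons x xs =>
    rw [List.cons_append, List.min?_cons', List.min?_cons', List.foldl_append]
    have h : List.foldl min (List.foldl min x xs) [a] = min (List.foldl min x xs) a := rfl
    rw [h]
    rcases lt_or_ge a (List.foldl min x xs) with h | h <;> simp [min_def] <;> omega

lemma pv_enum_length {alpha : Type} : ∀ (l : List alpha) (s : Int),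
    (PySem.List.enumerate l s).length = l.length := by
  intro l
  induction l with
  | nil => intro s; rfl
  | cons x xs ih => intro s; simp [PySem.List.enumerate, ih]

lemma pv_enum_getElem {alpha : Type} : ∀ (l : List alpha) (s : Int) (k : Nat)
    (hk : k < (PySem.List.enumerate l s).length) (hk2 : k < l.length),
    (PySem.List.enumerate l s)[k] = (s + (k : Int), l[k]) := by
  intro l
  induction l with
  | nil => intro s k hk hk2; simp at hk2
  | cons x xs ih =>
    intro s k hk hk2
    cases k with
    | zero => simp [PySem.List.enumerate]
    | succ k =>
      have hk3 : k < (PySem.List.enumerate xs (s + 1)).length := by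
        rw [pv_enum_length]; simpa using hk2
      simp only [PySem.List.enumerate, List.getElem_cons_succ]
      rw [ih (s + 1) k hk3 (by simpa using hk2)]
      rw [Prod.mk.injEq]
      exact ⟨by push_cast; ring, rfl⟩

lemma pvMinB_add_le (c S : List Int) (i k : Int) (h : k ≤ i) :
    pvMinB c (PySem.Set.add S i) k = pvMinB c S k := by
  rw [PySem.Set.add_eq_ite]
  split
  · rfl
  · have hnk : ¬ (i < k) := by omega
    simp [pvMinB, List.filter_append, hnk]

lemma pvMinB_add_gt (c S : List Int) (i k : Int) (hik : i < k) :
    pvMinB c (PySem.Set.add S i) k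
      = (match pvMinB c S k with
         | none => some (pvAt c i)
         | some v => if pvAt c i < v then some (pvAt c i) else some v) := by
  by_cases hm : i ∈ S
  · rw [PySem.Set.add_of_mem hm]
    have hmemL : pvAt c i ∈ (S.filter (fun j => decide (j < k))).map (fun j => pvAt c j) :=
      List.mem_map_of_mem (List.mem_filter.2 ⟨hm, by simpa using hik⟩)
    rcases hmin : pvMinB c S k with _ | v
    · exfalso
      have h2 := List.min?_eq_none_iff.1 hmin
      rw [h2] at hmemL; simp at hmemL
    · have hspec := List.min?_eq_some_iff.1 hmin
      have hle : v ≤ pvAt c i := hspec.2 _ hmemL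
      have hnlt : ¬ (pvAt c i < v) := by omega
      simp [hnlt]
  · rw [PySem.Set.add_of_not_mem hm]
    have hik2 : decide (i < k) = true := by simpa using hik
    simp only [pvMinB, List.filter_append, List.filter_cons, hik2, List.filter_nil,
      List.map_append, List.map_cons, List.map_nil, if_pos]
    rw [pv_min?_append_singleton]
    rcases hx : (List.map (fun j => pvAt c j) (List.filter (fun j => decide (j < k)) S)).min? with _ | v
    · rfl
    · by_cases hpv : pvAt c i < v <;> simp [hpv]

lemma pvUpd_spec (c : List Int) (S : List Int) (i : Int) :
    pvUpd i (pvAt c i) ((List.range (c.length + 1)).map (fun k : Nat => pvMinB c S (k : Int)))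
      = (List.range (c.length + 1)).map (fun k : Nat => pvMinB c (PySem.Set.add S i) (k : Int)) := by
  apply List.ext_getElem
  · simp [pvUpd, pv_enum_length _ 0]
  · intro k h1 h2
    have hk : k < c.length + 1 := by simpa [pvUpd] using h1
    have hlenmap : k < ((List.range (c.length + 1)).map (fun k : Nat => pvMinB c S (k : Int))).length := by
      simpa using hk
    simp only [pvUpd, List.getElem_map]
    rw [pv_enum_getElem _ 0 k (by simpa [pv_enum_length] using hlenmap) hlenmap]
    simp only [List.getElem_map, List.getElem_range, zero_add]
    by_cases hki : (k : Int) ≤ i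
    · rw [if_pos hki, pvMinB_add_le c S i k hki]
    · have hik : i < (k : Int) := by omega
      rw [if_neg hki, pvMinB_add_gt c S i k hik]

lemma pvLoop_eq (perm c : List Int) (hlen : c.length ≤ perm.length)
    (hperm : ∀ pos : Nat, pos < c.length → 0 ≤ perm[pos]! ∧ perm[pos]! < (c.length : Int)) :
    ∀ (positions : List Int) (S : List Int),
      (∀ p ∈ positions, 0 ≤ p ∧ p < (c.length : Int)) →
      (∀ j ∈ S, 0 ≤ j ∧ j < (c.length : Int)) →
      pvLoopA perm c positions S
        = pvLoopB perm c positions ((List.range (c.length + 1)).map (fun k : Nat => pvMinB c S (k : Int))) := by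
  intro positions
  induction positions with
  | nil => intro S _ _; rfl
  | cons pos rest ih =>
    intro S hpos hS
    obtain ⟨hp0, hp1⟩ := hpos pos List.mem_cons_self
    have hpN : pos.toNat < c.length := by omega
    have hpP : pos.toNat < perm.length := by omega
    have hpg : PySem.List.pyGet? perm pos = some (perm[pos.toNat]'hpP) := pvGet_eq perm pos hp0 hpP
    obtain ⟨hi0, hi1⟩ := hperm pos.toNat hpN
    rw [getElem!_pos perm pos.toNat hpP] at hi0 hi1
    set i : Int := perm[pos.toNat]'hpP with hidef
    have hcg : PySem.List.pyGet? c i = some (pvAt c i) := pvGet_of_bounds c i hi0 hi1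
    set ci : Int := pvAt c i with hcidef
    have hpmlen : i.toNat < ((List.range (c.length + 1)).map (fun k : Nat => pvMinB c S (k : Int))).length := by
      simp; omega
    have hpmg : PySem.List.pyGet? ((List.range (c.length + 1)).map (fun k : Nat => pvMinB c S (k : Int))) i
        = some (pvMinB c S i) := by
      rw [pvGet_eq _ i hi0 hpmlen]
      simp only [List.getElem_map, List.getElem_range]
      rw [Int.toNat_of_nonneg hi0]
    have hany : (S.any (fun j => decide (j < i) &&
          (match PySem.List.pyGet? c j with
           | none => false
           | some cj => decide (cj < ci))) = true)
        ↔ ∃ v ∈ (S.filter (fun j => decide (j < i))).map (fun j => pvAt c j), v < ci := by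
      simp only [List.any_eq_true, List.mem_map, List.mem_filter]
      constructor
      · rintro ⟨j, hj, hcond⟩
        rw [pvGet_of_bounds c j (hS j hj).1 (hS j hj).2] at hcond
        simp only [Bool.and_eq_true, decide_eq_true_eq] at hcond
        exact ⟨pvAt c j, ⟨j, ⟨hj, by simpa using hcond.1⟩, rfl⟩, hcond.2⟩
      · rintro ⟨v, ⟨j, ⟨hj, hlt⟩, rfl⟩, hv⟩
        refine ⟨j, hj, ?_⟩
        rw [pvGet_of_bounds c j (hS j hj).1 (hS j hj).2]
        simp only [Bool.and_eq_true, decide_eq_true_eq]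
        exact ⟨by simpa using hlt, hv⟩
    simp only [pvLoopA, pvLoopB, hpg, hcg, hpmg]
    rcases hmin : pvMinB c S i with _ | v
    · have hnone : ¬ (S.any (fun j => decide (j < i) &&
          (match PySem.List.pyGet? c j with
           | none => false
           | some cj => decide (cj < ci))) = true) := by
        rw [hany]
        rintro ⟨v, hv, _⟩
        rw [List.min?_eq_none_iff.1 hmin] at hv
        simp at hv
      simp [hnone]
    · have hspec := List.min?_eq_some_iff.1 hmin
      by_cases hge : v ≥ ci
      · have hnone : ¬ (S.any (fun j => decide (j < i) &&
            (match PySem.List.pyGet? c j with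
             | none => false
             | some cj => decide (cj < ci))) = true) := by
          rw [hany]
          rintro ⟨w, hw, hwlt⟩
          have := hspec.2 _ hw
          omega
        simp [hnone, hge]
      · have hsome : S.any (fun j => decide (j < i) &&
            (match PySem.List.pyGet? c j with
             | none => false
             | some cj => decide (cj < ci))) = true := by
          rw [hany]
          exact ⟨v, hspec.1, by omega⟩
        rw [hsome]
        simp only [if_neg hge, if_pos]
        rw [pvUpd_spec c S i]
        exact ih (PySem.Set.add S i)
          (fun p hp => hpos p (List.mem_cons_of_mem _ hp))
          (fun j hj => by
            rcases (PySem.Set.mem_add S i j).1 hj with h | h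
            · exact hS j h
            · subst h; exact ⟨hi0, hi1⟩)

lemma pv_init_pm (c0 : Int) (t : List Int) :
    ((none : Option Int) ::
        (PySem.List.pyRepeat (PySem.List.slice (c0 :: t) none (some 1)) ((c0 :: t).length : Int)).map some)
      = (List.range ((c0 :: t).length + 1)).map (fun k : Nat => pvMinB (c0 :: t) [0] (k : Int)) := by
  have hslice : PySem.List.slice (c0 :: t) none (some 1) = [c0] := by
    rw [PySem.List.slice_to _ (by norm_num)]
    rfl
  rw [hslice, PySem.List.pyRepeat_singleton]
  rw [List.range_succ_eq_map, List.map_cons, List.map_map]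
  have h0 : pvMinB (c0 :: t) [0] ((0 : Nat) : Int) = none := by
    simp [pvMinB]
  rw [h0]
  congr 1
  apply List.ext_getElem
  · simp
  · intro k h1 h2
    simp only [List.getElem_map, List.getElem_range, List.getElem_replicate, Function.comp_apply]
    simp [pvMinB, pvAt]

-- ===== VERDICT (by name: the statement is the Claim_ definition above) =====
theorem is_valid_permutation_spec : Claim_equal_is_valid_permutation := by
  intro perm c _ hpre
  obtain ⟨hne, hor⟩ := hpre
  unfold Spec_is_valid_permutation is_valid_permutation is_valid_permutation_alt
  have h0 : 0 < perm.length := List.length_pos_iff.2 hne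
  have hg0 : PySem.List.pyGet? perm 0 = some (perm[0]'h0) := by
    simpa using pvGet_eq perm 0 (le_refl 0) (by simpa using h0)
  simp only [hg0]
  by_cases hp0 : perm[0]'h0 ≠ 0
  · rw [if_pos hp0, if_pos hp0]
  · obtain ⟨hlen, hperm⟩ : c.length ≤ perm.length ∧
        ∀ pos : Nat, pos < c.length →
          0 ≤ perm[pos]! ∧ perm[pos]! < (c.length : Int) := by
      rcases hor with h | h
      · rw [getElem!_pos perm 0 h0] at h; exact absurd h hp0
      · exact h
    rw [if_neg hp0, if_neg hp0]
    cases c with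
    | nil =>
      have hr : PySem.List.pyRange 1 ((([] : List Int).length : Int)) 1 = [] := by decide
      rw [hr]
      rfl
    | cons c0 t =>
      rw [pv_init_pm c0 t]
      have hofl : PySem.Set.ofList [(0 : Int)] = [0] := rfl
      rw [hofl]
      apply pvLoop_eq perm (c0 :: t) hlen hperm
      · intro p hp
        rw [PySem.List.mem_pyRange_one] at hp
        exact ⟨by omega, hp.2⟩
      · intro j hj
        simp only [List.mem_singleton] at hj
        subst hj
        exact ⟨le_refl 0, by exact_mod_cast Nat.succ_pos t.length⟩
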